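-- pv_equiv track=rewrite | github.com/soobeenpark/scratchwork | algorithms/bit_flips_counter/bitFlipsCounterRecursive.py | bitFlipsRecursive
-- ===== SOURCE A (Python) =====
-- def isPowerOfTwo(n):
--     """
--     Returns true if n is a power of two
--     """
--     return (n != 0) and ((n & (n - 1)) == 0)
--
-- def getClosestPowerOfTwo(n):
--     """
--     Returns the nearest power of two that is greater than or equal to n
--     """
--     while (not isPowerOfTwo(n)):
--         n = n + 1
--     return n
--
-- def bitFlipsRecursive(n):
--     """
--     Recursive implementation of number of bit flips necessary in binary counting
--
--     pre: n must be a positive integer (greater than 0).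
--     param (int): n
--     return (list): Array containing the number of bit flips for each number, starting from 0.
--     """
--     if (n == 1):  # Base case
--         return [1]
--
--     powerOfTwo = getClosestPowerOfTwo(n)
--
--     # Fill out first half of list
--     ret = bitFlipsRecursive(powerOfTwo // 2)
--
--     # Fill out second half of list
--     i = powerOfTwo // 2 + 1
--     while (i <= n):
--         # Second half of array is a copy of the first half of the array, with
--         # the exception of the very last value (copy of last element in first half + 1).
--         numToAdd = ret[i - powerOfTwo // 2 - 1]
--         if (i == n and isPowerOfTwo(n)):
--             numToAdd += 1
--         ret.append(numToAdd)
--         i += 1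
--     return ret
-- ===== SOURCE B (Python) =====
-- def bitFlipsRecursive(n):
--     def flips(v):
--         # bit flips when counting up to v = number of trailing zeros of v, plus 1
--         c = 1
--         while v % 2 == 0:
--             v //= 2
--             c += 1
--         return c
--     return [flips(i + 1) for i in range(n)]
-- ===== Notes on version B (the rewrite author's own statement) =====
-- stated objective: simpler
-- what changed: Replaced the recursive power-of-two halving with copy-second-half-from-first logic by a single direct loop that computes each entry independently as 1 + (number of trailing zeros of i+1).
import Mathlib
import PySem

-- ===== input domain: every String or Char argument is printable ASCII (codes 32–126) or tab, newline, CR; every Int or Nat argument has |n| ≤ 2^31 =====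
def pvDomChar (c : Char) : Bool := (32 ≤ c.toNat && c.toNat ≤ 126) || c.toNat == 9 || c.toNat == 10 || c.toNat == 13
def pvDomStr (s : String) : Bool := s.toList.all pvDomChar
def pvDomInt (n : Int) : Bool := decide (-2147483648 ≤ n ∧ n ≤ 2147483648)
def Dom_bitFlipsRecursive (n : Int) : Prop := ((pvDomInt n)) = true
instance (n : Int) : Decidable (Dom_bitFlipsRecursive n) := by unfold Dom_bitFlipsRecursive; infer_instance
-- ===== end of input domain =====

-- B replaces A's recursive power-of-two splitting by one direct loop computing each
-- entry as 1 + (trailing zeros of i+1); objective: simpler.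

-- ===== PORT A =====
def isPowerOfTwo (n : Int) : Bool := (n != 0) && (PySem.Int.band n (n - 1) == 0)

-- fuel makes the 'while not isPowerOfTwo(n): n += 1' loop total; it is large enough
-- that on every input where the Python loop terminates the port returns the same value
def getClosestAux : Nat → Int → Int
  | 0, n => n
  | fuel+1, n => if isPowerOfTwo n then n else getClosestAux fuel (n + 1)

def getClosestPowerOfTwo (n : Int) : Int := getClosestAux (n.toNat + (1 - n).toNat + 2) n

-- the 'while i <= n' append loop; ret[i - p/2 - 1] is PySem.List.pyGet? (getD 0 is
-- unreachable under Pre_, where the index is always in range)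
def fillAux (pHalf n : Int) : Nat → Int → List Int → List Int
  | 0, _, ret => ret
  | fuel+1, i, ret =>
    if i ≤ n then
      let numToAdd := (PySem.List.pyGet? ret (i - pHalf - 1)).getD 0
      let numToAdd := if i == n && isPowerOfTwo n then numToAdd + 1 else numToAdd
      fillAux pHalf n fuel (i + 1) (ret ++ [numToAdd])
    else ret

-- fuel bounds the recursion depth (A recurses on powerOfTwo // 2 < n under Pre_)
def bitFlipsAux : Nat → Int → List Int
  | 0, _ => []
  | fuel+1, n =>
    if n == 1 then [1]
    else
      let pHalf := PySem.Int.floordiv (getClosestPowerOfTwo n) 2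
      let ret := bitFlipsAux fuel pHalf
      fillAux pHalf n ((n - pHalf).toNat + 1) (pHalf + 1) ret

def bitFlipsRecursive (n : Int) : List Int := bitFlipsAux (n.toNat + 1) n

-- ===== PORT B =====
-- 'c = 1; while v % 2 == 0: v //= 2; c += 1' — fuel makes the while loop total
def flipsAux : Nat → Int → Int → Int
  | 0, _, c => c
  | fuel+1, v, c =>
    if PySem.Int.mod v 2 == 0 then flipsAux fuel (PySem.Int.floordiv v 2) (c + 1) else c

def flips (v : Int) : Int := flipsAux (v.toNat + 1) v 1

def bitFlipsRecursive_alt (n : Int) : List Int :=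
  (PySem.List.pyRange 0 n 1).map (fun i => flips (i + 1))

-- ===== PRECONDITION & SPEC =====
-- A's docstring requires n > 0; for n ≤ 0 the Python recursion never terminates (RecursionError)
def Pre_bitFlipsRecursive (n : Int) : Prop := 1 ≤ n
instance (n : Int) : Decidable (Pre_bitFlipsRecursive n) := by unfold Pre_bitFlipsRecursive; infer_instance
def pvWitness_bitFlipsRecursive : Int := 5

def Spec_bitFlipsRecursive (n : Int) (out : List Int) : Prop := out = bitFlipsRecursive_alt n
instance (n : Int) (out : List Int) : Decidable (Spec_bitFlipsRecursive n out) := by unfold Spec_bitFlipsRecursive; infer_instance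

-- ===== CLAIM (what is proved, stated in full; the proofs are below) =====
def Claim_equal_bitFlipsRecursive : Prop := ∀ (n : Int), Dom_bitFlipsRecursive n → Pre_bitFlipsRecursive n → Spec_bitFlipsRecursive n (bitFlipsRecursive n)

-- ===== LEMMAS AND PROOFS =====

-- the mathematical "ruler" value: 1 + number of trailing zeros of v
def ruler (v : Nat) : Int :=
  if h : v % 2 = 0 ∧ 0 < v then ruler (v / 2) + 1 else 1
  termination_by v
  decreasing_by exact Nat.div_lt_self h.2 (by omega)

def rulerList (N : Nat) : List Int := (List.range N).map (fun j => ruler (j + 1))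

-- B computes rulerList
theorem flipsAux_eq (fuel : Nat) : ∀ (V : Nat) (c : Int), 0 < V → V ≤ fuel →
    flipsAux fuel (V : Int) c = c + ruler V - 1 := by
  induction fuel with
  | zero => intro V c h1 h2; omega
  | succ fuel ih =>
    intro V c h1 h2
    rw [flipsAux, ruler]
    rcases Nat.even_or_odd V with he | ho
    · have hm : V % 2 = 0 := Nat.even_iff.mp he
      have : PySem.Int.mod (V : Int) 2 = ((V % 2 : Nat) : Int) := PySem.Int.mod_natCast V 2
      rw [this, show ((2:Int)) = ((2:Nat):Int) from rfl, PySem.Int.floordiv_natCast V 2]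
      rw [dif_pos ⟨hm, h1⟩]
      simp only [hm]
      rw [if_pos (by decide), ih (V / 2) (c + 1) (by omega) (by omega)]
      ring
    · have hm : V % 2 = 1 := Nat.odd_iff.mp ho
      have : PySem.Int.mod (V : Int) 2 = ((V % 2 : Nat) : Int) := PySem.Int.mod_natCast V 2
      rw [this]
      simp only [hm]
      rw [if_neg (by decide), dif_neg (by omega)]
      ring

theorem flips_eq (V : Nat) (h : 0 < V) : flips (V : Int) = ruler V := by
  have h2 : ((V : Int)).toNat = V := by omega
  rw [flips, h2, flipsAux_eq (V + 1) V 1 h (by omega)]; ring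

theorem alt_eq_rulerList (N : Nat) : bitFlipsRecursive_alt (N : Int) = rulerList N := by
  rw [bitFlipsRecursive_alt, PySem.List.pyRange_one, rulerList]
  simp only [sub_zero, Int.toNat_natCast, List.map_map]
  apply List.map_congr_left
  intro j _
  have : ((0 : Int) + j) + 1 = ((j + 1 : Nat) : Int) := by push_cast; ring
  simp only [Function.comp_apply, this, flips_eq (j + 1) (by omega)]

-- Nat-level power-of-two characterisation of n & (n-1) == 0
theorem land_pred_eq_zero_iff : ∀ (V : Nat), 0 < V → ((V &&& (V - 1)) = 0 ↔ ∃ k, V = 2 ^ k) := by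
  intro V
  induction V using Nat.strong_induction_on with
  | _ V ih =>
    intro hV
    rcases Nat.even_or_odd V with he | ho
    · -- V = 2a, a > 0
      obtain ⟨a, ha⟩ := he
      have ha2 : V = 2 * a := by omega
      have hapos : 0 < a := by omega
      have hb1 : V = Nat.bit false a := by simp [Nat.bit_val]; omega
      have hb2 : V - 1 = Nat.bit true (a - 1) := by simp [Nat.bit_val]; omega
      rw [hb2, hb1, Nat.land_bit]
      have hbz : Nat.bit (false && true) (a &&& (a - 1)) = 2 * (a &&& (a - 1)) := by
        simp [Nat.bit_val]
      rw [hbz]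
      have hiha := ih a (by omega) hapos
      constructor
      · intro h
        obtain ⟨k, hk⟩ := hiha.mp (by omega)
        refine ⟨k + 1, ?_⟩
        simp only [Nat.bit_val, Bool.toNat_false]
        rw [hk, pow_succ]; ring
      · intro ⟨k, hk⟩
        simp only [Nat.bit_val, Bool.toNat_false] at hk
        have hk1 : 1 ≤ k := by
          by_contra h
          interval_cases k
          omega
        have h2k : 2 * a = 2 * 2 ^ (k - 1) := by
          have hp : 2 ^ k = 2 * 2 ^ (k - 1) := by
            rw [← pow_succ']; congr 1; omega
          omega
        have := hiha.mpr ⟨k - 1, by omega⟩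
        omega
    · -- V odd
      obtain ⟨a, ha⟩ := ho
      rcases Nat.eq_zero_or_pos a with h0 | hapos
      · subst h0; simp at ha; subst ha; simp
        exact ⟨0, rfl⟩
      · have hb1 : V = Nat.bit true a := by simp [Nat.bit_val]; omega
        have hb2 : V - 1 = Nat.bit false a := by simp [Nat.bit_val]; omega
        rw [hb2, hb1, Nat.land_bit]
        have hbz : Nat.bit (true && false) (a &&& a) = 2 * a := by
          simp [Nat.bit_val, Nat.and_self]
        rw [hbz]
        constructor
        · intro h; omega
        · intro ⟨k, hk⟩
          exfalso
          simp only [Nat.bit_val, Bool.toNat_true] at hk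
          rcases Nat.eq_zero_or_pos k with h0 | hkpos
          · subst h0; simp at hk; omega
          · have : 2 ^ k % 2 = 0 := by
              have : 2 ^ k = 2 * 2 ^ (k - 1) := by
                rw [← pow_succ']; congr 1; omega
              omega
            omega

theorem isPowerOfTwo_natCast (V : Nat) :
    isPowerOfTwo (V : Int) = true ↔ (0 < V ∧ ∃ k, V = 2 ^ k) := by
  rcases Nat.eq_zero_or_pos V with h0 | hpos
  · subst h0; rw [isPowerOfTwo]; simp
  · rw [isPowerOfTwo]
    have hc : ((V : Int) - 1) = ((V - 1 : Nat) : Int) := by omega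
    rw [hc, PySem.Int.band_natCast]
    simp only [Bool.and_eq_true, bne_iff_ne, ne_eq, beq_iff_eq, Int.natCast_eq_zero]
    rw [land_pred_eq_zero_iff V hpos]
    constructor
    · intro ⟨_, h⟩; exact ⟨hpos, h⟩
    · intro ⟨_, h⟩; exact ⟨by omega, h⟩

-- the getClosestPowerOfTwo loop returns the least power of two ≥ n
theorem getClosestAux_eq (p : Nat) (hp : ∃ k, p = 2 ^ k) :
    ∀ (fuel : Nat) (m : Nat), m ≤ p → (∀ q : Nat, m ≤ q → q < p → ¬ ∃ k, q = 2 ^ k) →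
    p - m ≤ fuel → getClosestAux fuel (m : Int) = (p : Int) := by
  intro fuel
  induction fuel with
  | zero =>
    intro m h1 _ h3
    have : m = p := by omega
    subst this; rfl
  | succ fuel ih =>
    intro m h1 h2 h3
    rcases Nat.lt_or_ge m p with hlt | hge
    · have hfalse : isPowerOfTwo (m : Int) = false := by
        rcases Nat.eq_zero_or_pos m with h0 | hpos
        · subst h0
          rw [Bool.eq_false_iff]
          intro hc
          exact absurd ((isPowerOfTwo_natCast 0).mp hc).1 (by omega)
        · rw [Bool.eq_false_iff]
          intro hc
          exact h2 m le_rfl hlt ((isPowerOfTwo_natCast m).mp hc).2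
      rw [getClosestAux, hfalse]
      simp only [Bool.false_eq_true, if_false]
      have hc : ((m : Int) + 1) = ((m + 1 : Nat) : Int) := by omega
      rw [hc]
      exact ih (m + 1) (by omega) (fun q hq1 hq2 => h2 q (by omega) hq2) (by omega)
    · have hmp : m = p := by omega
      subst hmp
      obtain ⟨k, hk⟩ := hp
      have htrue : isPowerOfTwo (m : Int) = true :=
        (isPowerOfTwo_natCast m).mpr ⟨by subst hk; positivity, k, hk⟩
      rw [getClosestAux, htrue]
      simp only [if_true]

theorem getClosest_eq (N : Nat) (h : 1 ≤ N) :
    getClosestPowerOfTwo (N : Int) = ((2 ^ Nat.clog 2 N : Nat) : Int) := by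
  have hfuel : ((N : Int)).toNat + ((1 : Int) - (N : Int)).toNat + 2 = N + 2 := by omega
  rw [getClosestPowerOfTwo, hfuel]
  have hle : N ≤ 2 ^ Nat.clog 2 N := Nat.le_pow_clog (by norm_num) N
  have hnone : ∀ q : Nat, N ≤ q → q < 2 ^ Nat.clog 2 N → ¬ ∃ k, q = 2 ^ k := by
    intro q hq1 hq2 ⟨k, hk⟩
    have hck : Nat.clog 2 N ≤ k := Nat.clog_le_of_le_pow (by omega)
    have : 2 ^ Nat.clog 2 N ≤ 2 ^ k := Nat.pow_le_pow_right (by norm_num) hck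
    omega
  have hgap : 2 ^ Nat.clog 2 N - N ≤ N + 2 := by
    rcases Nat.eq_zero_or_pos (Nat.clog 2 N) with h0 | hcpos
    · rw [h0]; omega
    · have hmin : 2 ^ (Nat.clog 2 N - 1) < N := by
        by_contra hcon
        have := Nat.clog_le_of_le_pow (b := 2) (x := N) (Nat.not_lt.mp hcon)
        omega
      have hph : 2 ^ Nat.clog 2 N = 2 * 2 ^ (Nat.clog 2 N - 1) := by
        rw [← pow_succ']; congr 1; omega
      omega
  exact getClosestAux_eq (2 ^ Nat.clog 2 N) ⟨_, rfl⟩ (N + 2) N hle hnone hgap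

-- ruler facts
theorem ruler_pow (s : Nat) : ruler (2 ^ s) = s + 1 := by
  induction s with
  | zero => rw [ruler]; norm_num
  | succ s ih =>
    rw [ruler]
    have : 2 ^ (s + 1) % 2 = 0 ∧ 0 < 2 ^ (s + 1) := by
      have := Nat.one_le_two_pow (n := s)
      rw [pow_succ]; omega
    rw [dif_pos this]
    have h2 : 2 ^ (s + 1) / 2 = 2 ^ s := by
      rw [pow_succ]; omega
    rw [h2, ih]; push_cast; ring

theorem ruler_add_pow (s : Nat) : ∀ t, 0 < t → t < 2 ^ s → ruler (2 ^ s + t) = ruler t := by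
  induction s with
  | zero => intro t h1 h2; omega
  | succ s ih =>
    intro t h1 h2
    rcases Nat.even_or_odd t with he | ho
    · have hm : t % 2 = 0 := Nat.even_iff.mp he
      have hs : (2 ^ (s + 1) + t) % 2 = 0 := by
        have : 2 ^ (s+1) % 2 = 0 := by rw [pow_succ]; omega
        omega
      rw [ruler, dif_pos ⟨hs, by positivity⟩]
      have hdiv : (2 ^ (s + 1) + t) / 2 = 2 ^ s + t / 2 := by
        rw [pow_succ]; omega
      rw [hdiv, ih (t / 2) (by omega) (by rw [pow_succ] at h2; omega)]
      conv_rhs => rw [ruler, dif_pos ⟨hm, h1⟩]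
    · have hm : t % 2 = 1 := Nat.odd_iff.mp ho
      have hs : (2 ^ (s + 1) + t) % 2 = 1 := by
        have : 2 ^ (s+1) % 2 = 0 := by rw [pow_succ]; omega
        omega
      rw [ruler, dif_neg (by omega)]
      conv_rhs => rw [ruler, dif_neg (by omega)]

-- the fill loop extends rulerList (i-1) to rulerList N
theorem fillAux_eq (s : Nat) (N : Nat) (_hlo : 2 ^ s < N) (hhi : N ≤ 2 ^ (s + 1)) :
    ∀ (fuel : Nat) (i : Nat), 2 ^ s + 1 ≤ i → i ≤ N + 1 → N + 1 - i ≤ fuel →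
    fillAux ((2 ^ s : Nat) : Int) (N : Int) fuel (i : Int) (rulerList (i - 1)) = rulerList N := by
  intro fuel
  induction fuel with
  | zero =>
    intro i h1 h2 h3
    have hiN : i = N + 1 := by omega
    subst hiN
    rw [show N + 1 - 1 = N by omega]
    rfl
  | succ fuel ih =>
    intro i h1 h2 h3
    have hs1 : 1 ≤ 2 ^ s := Nat.one_le_two_pow
    by_cases hiN : i ≤ N
    · rw [fillAux, if_pos (by exact_mod_cast hiN)]
      have hidx : ((i : Int) - ((2 ^ s : Nat) : Int) - 1) = ((i - 2 ^ s - 1 : Nat) : Int) := by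
        omega
      rw [hidx, PySem.List.pyGet?_natCast]
      have hget : (rulerList (i - 1))[(i - 2 ^ s - 1 : Nat)]? = some (ruler (i - 2 ^ s)) := by
        rw [rulerList, List.getElem?_map, List.getElem?_range (by omega), Option.map_some,
          show i - 2 ^ s - 1 + 1 = i - 2 ^ s by omega]
      rw [hget, Option.getD_some]
      have happ : ∀ v : Int, v = ruler i →
          rulerList (i - 1) ++ [v] = rulerList ((i + 1) - 1) := by
        intro v hv
        rw [hv, rulerList, rulerList, show (i + 1) - 1 = (i - 1) + 1 by omega,
          List.range_succ, List.map_append, List.map_singleton,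
          show (i - 1) + 1 = i by omega]
      have hcast : ((i : Int) + 1) = ((i + 1 : Nat) : Int) := by omega
      by_cases hc : i = N ∧ ∃ k, N = 2 ^ k
      · -- last element of a power-of-two-length list: N = 2^(s+1), +1 branch
        obtain ⟨hie, k, hk⟩ := hc
        have hks : k = s + 1 := by
          have h1k : s < k := by
            have := (Nat.pow_lt_pow_iff_right (a := 2) (by norm_num)).mp (by omega : 2 ^ s < 2 ^ k)
            omega
          have h2k : k ≤ s + 1 := by
            have := (Nat.pow_le_pow_iff_right (a := 2) (by norm_num)).mp (by omega : 2 ^ k ≤ 2 ^ (s + 1))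
            omega
          omega
        have hN2 : N = 2 ^ (s + 1) := by rw [hk, hks]
        have hcond : (((i : Int) == (N : Int)) && isPowerOfTwo (N : Int)) = true := by
          rw [hie]
          simp only [beq_self_eq_true, Bool.true_and]
          exact (isPowerOfTwo_natCast N).mpr ⟨by omega, k, hk⟩
        rw [hcond]
        simp only [if_true]
        have hval : ruler (i - 2 ^ s) + 1 = ruler i := by
          have hi2 : i - 2 ^ s = 2 ^ s := by
            have : 2 ^ (s + 1) = 2 * 2 ^ s := by rw [← pow_succ']
            omega
          rw [hi2, ruler_pow, hie, hN2, ruler_pow]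
          push_cast; ring
        rw [happ _ hval, hcast]
        exact ih (i + 1) (by omega) (by omega) (by omega)
      · -- interior element: copy of the first half, no +1
        have hcond : (((i : Int) == (N : Int)) && isPowerOfTwo (N : Int)) = false := by
          by_cases hie : i = N
          · have hnp : ¬ ∃ k, N = 2 ^ k := fun h => hc ⟨hie, h⟩
            have : isPowerOfTwo (N : Int) = false := by
              rw [Bool.eq_false_iff]
              intro hct
              exact hnp ((isPowerOfTwo_natCast N).mp hct).2
            rw [this, Bool.and_false]
          · have : ((i : Int) == (N : Int)) = false := by
              rw [beq_eq_false_iff_ne]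
              intro hcast'
              exact hie (by omega)
            rw [this, Bool.false_and]
        rw [hcond]
        simp only [Bool.false_eq_true, if_false]
        have hlt2 : i < 2 ^ (s + 1) := by
          by_contra hcon
          have hie : i = 2 ^ (s + 1) := by omega
          have hieN : i = N := by omega
          exact hc ⟨hieN, s + 1, by omega⟩
        have hval : ruler (i - 2 ^ s) = ruler i := by
          have := ruler_add_pow s (i - 2 ^ s) (by omega)
            (by have : 2 ^ (s + 1) = 2 * 2 ^ s := by rw [← pow_succ']
                omega)
          rw [show 2 ^ s + (i - 2 ^ s) = i by omega] at this
          exact this.symm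
        rw [happ _ hval, hcast]
        exact ih (i + 1) (by omega) (by omega) (by omega)
    · rw [fillAux, if_neg (by exact_mod_cast hiN)]
      have : i = N + 1 := by omega
      subst this
      rw [show N + 1 - 1 = N by omega]

-- main induction
theorem bitFlipsAux_eq (fuel : Nat) : ∀ (N : Nat), 1 ≤ N → N ≤ fuel →
    bitFlipsAux fuel (N : Int) = rulerList N := by
  induction fuel with
  | zero => intro N h1 h2; omega
  | succ fuel ih =>
    intro N h1 h2
    by_cases hN1 : N = 1
    · subst hN1
      rw [bitFlipsAux]
      norm_num [rulerList, List.range_succ]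
      rw [ruler]
      norm_num
    · have hN2 : 2 ≤ N := by omega
      have hne : ((N : Int) == 1) = false := by
        rw [beq_eq_false_iff_ne]; omega
      rw [bitFlipsAux, hne]
      simp only [Bool.false_eq_true, if_false]
      rw [getClosest_eq N h1]
      have hCpos : 0 < Nat.clog 2 N := Nat.clog_pos (by norm_num) (by omega)
      have hph : 2 ^ Nat.clog 2 N = 2 * 2 ^ (Nat.clog 2 N - 1) := by
        rw [← pow_succ']; congr 1; omega
      have hfd : PySem.Int.floordiv ((2 ^ Nat.clog 2 N : Nat) : Int) 2
          = ((2 ^ (Nat.clog 2 N - 1) : Nat) : Int) := by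
        rw [show ((2 : Int)) = ((2 : Nat) : Int) from rfl, PySem.Int.floordiv_natCast]
        congr 1; omega
      rw [hfd]
      have hMlt : 2 ^ (Nat.clog 2 N - 1) < N := by
        by_contra hcon
        have := Nat.clog_le_of_le_pow (b := 2) (x := N) (Nat.not_lt.mp hcon)
        omega
      rw [ih (2 ^ (Nat.clog 2 N - 1)) Nat.one_le_two_pow (by omega)]
      have hcast : ((2 ^ (Nat.clog 2 N - 1) : Nat) : Int) + 1
          = ((2 ^ (Nat.clog 2 N - 1) + 1 : Nat) : Int) := by omega
      have hfuel : (((N : Int)) - ((2 ^ (Nat.clog 2 N - 1) : Nat) : Int)).toNat + 1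
          = N - 2 ^ (Nat.clog 2 N - 1) + 1 := by omega
      rw [hcast, hfuel,
        show rulerList (2 ^ (Nat.clog 2 N - 1)) = rulerList ((2 ^ (Nat.clog 2 N - 1) + 1) - 1) by
          congr 1]
      have hs : N ≤ 2 ^ ((Nat.clog 2 N - 1) + 1) := by
        rw [show (Nat.clog 2 N - 1) + 1 = Nat.clog 2 N by omega]
        exact Nat.le_pow_clog (by norm_num) N
      exact fillAux_eq (Nat.clog 2 N - 1) N hMlt hs _ (2 ^ (Nat.clog 2 N - 1) + 1)
        (by omega) (by omega) (by omega)

-- ===== VERDICT (by name: the statement is the Claim_ definition above) =====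
theorem bitFlipsRecursive_spec : Claim_equal_bitFlipsRecursive := by
  intro n _ hpre
  have h1 : (1:Int) ≤ n := hpre
  have hN : n = ((n.toNat : Nat) : Int) := by omega
  unfold Spec_bitFlipsRecursive
  rw [hN, alt_eq_rulerList, bitFlipsRecursive]
  rw [show (((n.toNat : Nat) : Int)).toNat = n.toNat by omega]
  exact bitFlipsAux_eq (n.toNat + 1) n.toNat (by omega) (by omega)
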